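-- pv_equiv track=rewrite | github.com/mohamadsolkhannawawi/informatics-practicum-portfolio | Semester-4/Algorithm-Strategy-Analysis/06-Algorithm-Strategy-Analysis/PemimpinBebek.py | adaPemimpin
-- ===== SOURCE A (Python) =====
-- def adaPemimpin(kelompokBebek):
--     jumlahBebek = len(kelompokBebek)
--
--     for kiri in range(jumlahBebek):
--         for kanan in range(kiri, jumlahBebek):
--             subKelompok = kelompokBebek[kiri:kanan+1]
--             if not pemimpinUnik(subKelompok):
--                 return "NO"
--
--     return "YES"
--
-- def pemimpinUnik(kelompok):
--     frekuensi = {}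
--     for nilai in kelompok:
--         frekuensi[nilai] = frekuensi.get(nilai, 0) + 1
--
--     nilaiUnik = [nilai for nilai, jumlah in frekuensi.items() if jumlah == 1]
--
--
--     return len(nilaiUnik) > 0 or len(set(kelompok)) > 1
-- ===== SOURCE B (Python) =====
-- def adaPemimpin(kelompokBebek):
--     for sekarang, berikut in zip(kelompokBebek, kelompokBebek[1:]):
--         if sekarang == berikut:
--             return "NO"
--     return "YES"
-- ===== Notes on version B (the rewrite author's own statement) =====
-- stated objective: faster
-- what changed: Replaced the O(n^3) enumeration of all subarrays with a frequency-dict check per subarray by a single pass over adjacent pairs: a subarray violates the leader condition iff two adjacent elements are equal.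
import Mathlib
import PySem

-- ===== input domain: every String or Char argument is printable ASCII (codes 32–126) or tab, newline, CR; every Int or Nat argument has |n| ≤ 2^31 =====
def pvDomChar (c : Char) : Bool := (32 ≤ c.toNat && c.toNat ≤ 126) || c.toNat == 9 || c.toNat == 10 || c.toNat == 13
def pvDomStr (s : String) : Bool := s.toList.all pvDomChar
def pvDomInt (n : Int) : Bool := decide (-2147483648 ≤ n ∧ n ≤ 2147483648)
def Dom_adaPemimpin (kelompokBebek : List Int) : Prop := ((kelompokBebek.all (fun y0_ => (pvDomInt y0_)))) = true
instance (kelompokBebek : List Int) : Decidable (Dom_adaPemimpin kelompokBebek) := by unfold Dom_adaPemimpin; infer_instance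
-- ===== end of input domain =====

-- B replaces A's enumeration of every subarray (with a frequency-dict test each) by a single
-- pass over adjacent pairs: a subarray violates the condition iff two adjacent elements are equal.

-- ===== PORT A =====
def pemimpinUnik (kelompok : List Int) : Bool :=
  let frekuensi := kelompok.foldl (fun d nilai => d.insert nilai (d.getD nilai 0 + 1)) PySem.Dict.empty
  let nilaiUnik := (frekuensi.items.filter (fun p => p.2 == (1 : Int))).map Prod.fst
  decide (nilaiUnik.length > 0) || decide ((PySem.Set.ofList kelompok).length > 1)

def adaPemimpin (kelompokBebek : List Int) : String :=
  let jumlahBebek : Int := kelompokBebek.length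
  if (PySem.List.pyRange 0 jumlahBebek 1).any (fun kiri =>
       (PySem.List.pyRange kiri jumlahBebek 1).any (fun kanan =>
         !pemimpinUnik (PySem.List.slice kelompokBebek (some kiri) (some (kanan + 1)))))
  then "NO" else "YES"

-- ===== PORT B =====
def adaPemimpin_alt (kelompokBebek : List Int) : String :=
  if (kelompokBebek.zip (PySem.List.slice kelompokBebek (some 1) none)).any
       (fun p => p.1 == p.2)
  then "NO" else "YES"

-- ===== PRECONDITION & SPEC =====
def Spec_adaPemimpin (kelompokBebek : List Int) (out : String) : Prop := out = adaPemimpin_alt kelompokBebek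
instance (kelompokBebek : List Int) (out : String) : Decidable (Spec_adaPemimpin kelompokBebek out) := by unfold Spec_adaPemimpin; infer_instance

-- ===== CLAIM (what is proved, stated in full; the proofs are below) =====
def Claim_equal_adaPemimpin : Prop := ∀ (kelompokBebek : List Int), Dom_adaPemimpin kelompokBebek → Spec_adaPemimpin kelompokBebek (adaPemimpin kelompokBebek)

-- ===== LEMMAS AND PROOFS =====

-- A's subgroup test fails exactly when no value occurs once and there is at most one distinct value
theorem pemimpinUnik_false_iff (s : List Int) :
    pemimpinUnik s = false ↔ ((∀ v ∈ s, s.count v ≠ 1) ∧ (PySem.Set.ofList s).length ≤ 1) := by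
  simp [pemimpinUnik, PySem.Dict.foldl_insert_getD_add_one_eq_counter, PySem.Dict.items_counter,
    List.filter_map, List.length_filter_pos_iff, PySem.Set.mem_ofList]

-- a list failing the test has all elements equal
theorem allEq_of_false (s : List Int) (h : pemimpinUnik s = false) :
    ∀ a ∈ s, ∀ b ∈ s, a = b := by
  rw [pemimpinUnik_false_iff] at h
  intro a ha b hb
  have ha' := (PySem.Set.mem_ofList (xs := s) (y := a)).2 ha
  have hb' := (PySem.Set.mem_ofList (xs := s) (y := b)).2 hb
  rcases e : PySem.Set.ofList s with _ | ⟨v, t⟩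
  · rw [e] at ha'; simp at ha'
  · have hlen := h.2
    rw [e] at hlen
    simp only [List.length_cons] at hlen
    have ht : t = [] := List.eq_nil_of_length_eq_zero (by omega)
    subst ht
    rw [e] at ha' hb'; simp at ha' hb'; omega

theorem pemimpinUnik_pair (v : Int) : pemimpinUnik [v, v] = false := by
  rw [pemimpinUnik_false_iff]
  refine ⟨?_, ?_⟩
  · intro w hw; simp at hw; subst hw; simp
  · simp [PySem.Set.ofList]

-- a failing slice inside A's loop bounds yields an equal adjacent pair of the input
theorem adjacent_of_bad_slice (xs : List Int) (kiri kanan : Int)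
    (h0 : 0 ≤ kiri) (hkk : kiri ≤ kanan) (hkn : kanan < (xs.length : Int))
    (hbad : pemimpinUnik (PySem.List.slice xs (some kiri) (some (kanan + 1))) = false) :
    ∃ i, ∃ h : i + 1 < xs.length, xs[i] = xs[i+1] := by
  set k : Nat := kiri.toNat with hk
  set j : Nat := kanan.toNat with hj
  have hkiri : kiri = (k : Int) := by omega
  have hkanan : kanan + 1 = ((j + 1 : Nat) : Int) := by omega
  rw [hkiri, hkanan, PySem.List.slice_natCast] at hbad
  set s := (xs.drop k).take (j + 1 - k) with hs
  have hkj : k ≤ j := by omega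
  have hjlen : j < xs.length := by omega
  have hlen : s.length = min (j + 1 - k) (xs.length - k) := by
    simp [hs]
  have hpos : 1 ≤ s.length := by omega
  have h2 : 2 ≤ s.length := by
    by_contra hlt
    have hone : s.length = 1 := by omega
    obtain ⟨w, hw⟩ := List.length_eq_one_iff.1 hone
    rw [pemimpinUnik_false_iff] at hbad
    exact hbad.1 w (by simp [hw]) (by simp [hw])
  have hk1 : k + 1 < xs.length := by omega
  have h0' : 0 < s.length := by omega
  have h1' : 1 < s.length := by omega
  have e0 : s[0]'h0' = xs[k]'(by omega) := by
    simp [hs]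
  have e1 : s[1]'h1' = xs[k+1]'hk1 := by
    simp [hs]
  have := allEq_of_false s hbad (s[0]'h0') (List.getElem_mem _) (s[1]'h1') (List.getElem_mem _)
  exact ⟨k, hk1, by rw [← e0, ← e1]; exact this⟩

-- conversely, an equal adjacent pair gives a failing length-2 slice
theorem bad_slice_of_adjacent (xs : List Int) (i : Nat) (h : i + 1 < xs.length)
    (heq : xs[i] = xs[i+1]) :
    pemimpinUnik (PySem.List.slice xs (some (i : Int)) (some ((i : Int) + 1 + 1))) = false := by
  have hc : (i : Int) + 1 + 1 = ((i + 2 : Nat) : Int) := by push_cast; ring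
  rw [hc, PySem.List.slice_natCast]
  have hd : xs.drop i = xs[i] :: xs[i+1] :: xs.drop (i+2) := by
    rw [List.drop_eq_getElem_cons (by omega), List.drop_eq_getElem_cons (by omega)]
  rw [hd]
  simp only [show i + 2 - i = 2 from by omega, List.take_succ_cons, List.take_succ_cons, List.take_zero]
  rw [← heq]
  exact pemimpinUnik_pair _

-- B's guard in index form
theorem adj_iff (xs : List Int) :
    (xs.zip xs.tail).any (fun p => p.1 == p.2) = true ↔
      ∃ i, ∃ h : i + 1 < xs.length, xs[i] = xs[i+1] := by
  simp only [List.any_eq_true, List.mem_iff_getElem, List.getElem_zip, List.getElem_tail,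
    List.length_zip, List.length_tail, beq_iff_eq]
  constructor
  · rintro ⟨p, ⟨i, hi, rfl⟩, hpe⟩
    exact ⟨i, by omega, hpe⟩
  · rintro ⟨i, hi, he⟩
    exact ⟨(xs[i], xs[i+1]), ⟨i, by omega, by simp⟩, he⟩

-- the two guards are the same Bool
theorem guard_iff (xs : List Int) :
    ((PySem.List.pyRange 0 (xs.length : Int) 1).any (fun kiri =>
       (PySem.List.pyRange kiri (xs.length : Int) 1).any (fun kanan =>
         !pemimpinUnik (PySem.List.slice xs (some kiri) (some (kanan + 1)))))) =
    ((xs.zip xs.tail).any (fun p => p.1 == p.2)) := by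
  rw [Bool.eq_iff_iff]
  constructor
  · intro h
    simp only [List.any_eq_true, Bool.not_eq_eq_eq_not, Bool.not_true] at h
    obtain ⟨kiri, hkiri, kanan, hkanan, hbad⟩ := h
    rw [PySem.List.mem_pyRange_one] at hkiri hkanan
    obtain ⟨i, hi, he⟩ := adjacent_of_bad_slice xs kiri kanan hkiri.1 hkanan.1 hkanan.2 hbad
    exact (adj_iff xs).2 ⟨i, hi, he⟩
  · intro hb
    obtain ⟨i, hi, he⟩ := (adj_iff xs).1 hb
    simp only [List.any_eq_true]
    refine ⟨(i : Int), ?_, ((i : Int) + 1), ?_, ?_⟩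
    · rw [PySem.List.mem_pyRange_one]; omega
    · rw [PySem.List.mem_pyRange_one]; omega
    · rw [bad_slice_of_adjacent xs i hi he]; rfl

theorem adaPemimpin_eq (xs : List Int) : adaPemimpin xs = adaPemimpin_alt xs := by
  simp only [adaPemimpin, adaPemimpin_alt, PySem.List.slice_from_one, guard_iff]

-- ===== VERDICT (by name: the statement is the Claim_ definition above) =====
theorem adaPemimpin_spec : Claim_equal_adaPemimpin := by
  intro xs _
  unfold Spec_adaPemimpin
  exact adaPemimpin_eq xs
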